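-- pv_equiv track=rewrite | github.com/fkie-cad/spmac | g-sidon-sets/compute_rulers.py | is_sidon_set
-- ===== SOURCE A (Python) =====
-- def is_sidon_set(list, g):
--     diffs = {}
--     for i in range(len(list)):
--         for j in range(i+1, len(list)):
--             d = list[i] - list[j]
--             if d<0:
--                 d=-d
--             if d not in diffs:
--                 diffs[d] = 0
--             diffs[d]+=1
--
--             if diffs[d] > g:
--                 return False
--
--     return True
-- ===== SOURCE B (Python) =====
-- def is_sidon_set(list, g):
--     diffs = sorted(abs(x - y) for i, x in enumerate(list) for y in list[i + 1:])
--     ok = True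
--     prev = None
--     run = 0
--     for d in diffs:
--         run = run + 1 if d == prev else 1
--         prev = d
--         ok = ok and run <= g
--     return ok
-- ===== Notes on version B (the rewrite author's own statement) =====
-- stated objective: alternative
-- what changed: Replaces A's dict-of-counts with early return by a dict-free sort-then-scan: build the list of absolute pairwise differences, sort it so equal differences become adjacent, then a single linear run-length scan checks that no run is longer than g.
import Mathlib
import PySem

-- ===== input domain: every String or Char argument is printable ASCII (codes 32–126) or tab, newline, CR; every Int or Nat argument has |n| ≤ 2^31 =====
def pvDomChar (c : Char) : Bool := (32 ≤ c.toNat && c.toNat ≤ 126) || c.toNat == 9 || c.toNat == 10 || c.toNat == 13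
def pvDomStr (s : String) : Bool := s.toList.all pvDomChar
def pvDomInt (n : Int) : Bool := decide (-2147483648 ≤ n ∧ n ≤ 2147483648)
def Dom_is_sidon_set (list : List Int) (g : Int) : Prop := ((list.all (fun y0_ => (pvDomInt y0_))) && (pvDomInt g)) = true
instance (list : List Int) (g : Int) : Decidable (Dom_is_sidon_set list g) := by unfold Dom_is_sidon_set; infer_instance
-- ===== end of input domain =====

-- B replaces A's dict of difference counts (with interleaved early return) by a dict-free
-- sort-then-scan: sort the absolute pairwise differences, then one run-length scan checks
-- that no run of equal differences is longer than g; objective: alternative (not faster).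

-- ===== PORT A =====
-- inner loop 'for j in range(i+1, len(list))'; the Option state is the early 'return False'
-- (none = returned False).  Indices i, j always lie in range, so pyGetD is exact here.
def pvJLoop (list : List Int) (g i : Int) (js : List Int) (diffs : PySem.Dict Int Int) :
    Option (PySem.Dict Int Int) :=
  match js with
  | [] => some diffs
  | j :: rest =>
    let d0 := PySem.List.pyGetD list i 0 - PySem.List.pyGetD list j 0
    let d := if d0 < 0 then -d0 else d0
    let diffs1 := if diffs.get? d = none then diffs.insert d 0 else diffs
    let diffs2 := diffs1.insert d (diffs1.getD d 0 + 1)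
    if diffs2.getD d 0 > g then none else pvJLoop list g i rest diffs2

-- outer loop 'for i in range(len(list))'
def pvILoop (list : List Int) (g : Int) (is : List Int) (diffs : PySem.Dict Int Int) :
    Option (PySem.Dict Int Int) :=
  match is with
  | [] => some diffs
  | i :: rest =>
    match pvJLoop list g i (PySem.List.pyRange (i + 1) (PySem.List.len list)) diffs with
    | none => none
    | some diffs => pvILoop list g rest diffs

def is_sidon_set (list : List Int) (g : Int) : Bool :=
  (pvILoop list g (PySem.List.pyRange 0 (PySem.List.len list)) PySem.Dict.empty).isSome

-- ===== PORT B =====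
-- for d in diffs: run = run + 1 if d == prev else 1 ; prev = d ; ok = ok and run <= g
def pvRunLoop (g : Int) : List Int → Bool → Option Int → Int → Bool
  | [], ok, _, _ => ok
  | d :: ds, ok, prev, run =>
    let run' := if some d = prev then run + 1 else 1
    pvRunLoop g ds (ok && decide (run' ≤ g)) (some d) run'

-- diffs = sorted(abs(x - y) for i, x in enumerate(list) for y in list[i+1:]) then the scan
def is_sidon_set_alt (list : List Int) (g : Int) : Bool :=
  let diffs := PySem.List.sorted ((PySem.List.enumerate list).flatMap
    (fun p => (PySem.List.slice list (some (p.1 + 1)) none).map (fun y => |p.2 - y|)))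
    (fun x => x) false
  pvRunLoop g diffs true none 0

-- ===== PRECONDITION & SPEC =====
def Spec_is_sidon_set (list : List Int) (g : Int) (out : Bool) : Prop := out = is_sidon_set_alt list g
instance (list : List Int) (g : Int) (out : Bool) : Decidable (Spec_is_sidon_set list g out) := by unfold Spec_is_sidon_set; infer_instance

-- ===== CLAIM (what is proved, stated in full; the proofs are below) =====
def Claim_equal_is_sidon_set : Prop := ∀ (list : List Int) (g : Int), Dom_is_sidon_set list g → Spec_is_sidon_set list g (is_sidon_set list g)

-- ===== LEMMAS AND PROOFS =====

-- the dict update performed by A's loop body for one difference d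
def pvUpd (c : PySem.Dict Int Int) (d : Int) : PySem.Dict Int Int :=
  let c1 := if c.get? d = none then c.insert d 0 else c
  c1.insert d (c1.getD d 0 + 1)

-- A's loop body, abstracted to the stream of difference values it processes
def pvProc (g : Int) : List Int → PySem.Dict Int Int → Option (PySem.Dict Int Int)
  | [], c => some c
  | d :: ds, c => if (pvUpd c d).getD d 0 > g then none else pvProc g ds (pvUpd c d)

theorem pvUpd_getD (c : PySem.Dict Int Int) (d x : Int) :
    (pvUpd c d).getD x 0 = c.getD x 0 + (if x = d then 1 else 0) := by
  unfold pvUpd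
  by_cases h : c.get? d = none
  · simp only [h, if_pos, PySem.Dict.getD_insert]
    rcases eq_or_ne x d with rfl | hne
    · simp [PySem.Dict.getD_of_get?_eq_none c 0 h]
    · simp [hne]
  · simp only [h, if_false, PySem.Dict.getD_insert]
    rcases eq_or_ne x d with rfl | hne
    · simp
    · simp [hne]

theorem pvJLoop_eq_proc (list : List Int) (g i : Int) (js : List Int)
    (c : PySem.Dict Int Int) :
    pvJLoop list g i js c =
      pvProc g (js.map (fun j =>
        let d0 := PySem.List.pyGetD list i 0 - PySem.List.pyGetD list j 0
        if d0 < 0 then -d0 else d0)) c := by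
  induction js generalizing c with
  | nil => rfl
  | cons j rest ih =>
    simp only [pvJLoop, pvProc, List.map_cons, pvUpd]
    split <;> simp [ih]

theorem pvProc_append (g : Int) (ds₁ ds₂ : List Int) (c : PySem.Dict Int Int) :
    pvProc g (ds₁ ++ ds₂) c = (pvProc g ds₁ c).bind (pvProc g ds₂) := by
  induction ds₁ generalizing c with
  | nil => rfl
  | cons d rest ih =>
    simp only [List.cons_append, pvProc]
    split <;> simp [ih]

theorem pvILoop_eq_proc (list : List Int) (g : Int) (is : List Int)
    (c : PySem.Dict Int Int) :
    pvILoop list g is c =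
      pvProc g (is.flatMap (fun i =>
        (PySem.List.pyRange (i + 1) (PySem.List.len list)).map (fun j =>
          let d0 := PySem.List.pyGetD list i 0 - PySem.List.pyGetD list j 0
          if d0 < 0 then -d0 else d0))) c := by
  induction is generalizing c with
  | nil => rfl
  | cons i rest ih =>
    simp only [pvILoop, List.flatMap_cons, pvProc_append, pvJLoop_eq_proc]
    cases pvProc g _ c <;> simp [ih]

-- A's early return fires iff some final count exceeds g
theorem pvProc_isSome (g : Int) (ds p : List Int) (c : PySem.Dict Int Int)
    (h1 : ∀ x, c.getD x 0 = (p.count x : Int))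
    (h2 : ∀ x ∈ p, (p.count x : Int) ≤ g) :
    (pvProc g ds c).isSome = decide (∀ x ∈ ds, (((p ++ ds).count x : Nat) : Int) ≤ g) := by
  induction ds generalizing p c with
  | nil => simp [pvProc]
  | cons d rest ih =>
    have hupd : ∀ x, (pvUpd c d).getD x 0 = (((p ++ [d]).count x : Nat) : Int) := by
      intro x
      rw [pvUpd_getD, h1]
      rcases eq_or_ne x d with rfl | hne
      · simp [List.count_append]
      · simp [List.count_append, List.count_eq_zero, hne]
    simp only [pvProc]
    by_cases hgt : (pvUpd c d).getD d 0 > g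
    · rw [if_pos hgt]
      have hd : ¬ (((p ++ d :: rest).count d : Nat) : Int) ≤ g := by
        rw [hupd d] at hgt
        have : (p ++ [d]).count d ≤ (p ++ d :: rest).count d := by
          simp [List.count_append]
        push_cast at *
        omega
      simp only [Option.isSome_none]
      symm
      rw [decide_eq_false_iff_not]
      intro hall
      exact hd (hall d (by simp))
    · rw [if_neg hgt]
      have hle : (((p ++ [d]).count d : Nat) : Int) ≤ g := by
        rw [hupd d] at hgt; omega
      have h2' : ∀ x ∈ p ++ [d], (((p ++ [d]).count x : Nat) : Int) ≤ g := by
        intro x hx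
        rcases eq_or_ne x d with rfl | hne
        · exact hle
        · rcases List.mem_append.1 hx with hxp | hxd
          · have := h2 x hxp
            simpa [List.count_append, List.count_singleton, Ne.symm hne] using this
          · simp at hxd; exact absurd hxd hne
      rw [ih (p ++ [d]) (pvUpd c d) hupd h2']
      rw [decide_eq_decide]
      constructor
      · intro hall x hx
        rcases List.mem_cons.1 hx with rfl | hxr
        · by_cases hdr : x ∈ rest
          · simpa [List.append_assoc] using hall x hdr
          · have hcnt : rest.count x = 0 := List.count_eq_zero.2 hdr
            simp only [List.count_append, List.count_cons_self] at hle ⊢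
            push_cast at *
            omega
        · simpa [List.append_assoc] using hall x hxr
      · intro hall x hx
        have := hall x (List.mem_cons_of_mem d hx)
        simpa [List.append_assoc] using this

-- reading indices a, a+1, … through the list is the tail slice xs.drop a
theorem pv_map_pyGetD_pyRange_from (xs : List Int) (a : Nat) :
    (PySem.List.pyRange (a : Int) (PySem.List.len xs)).map
        (fun j => PySem.List.pyGetD xs j 0) = xs.drop a := by
  generalize hk : xs.length - a = k
  induction k generalizing a with
  | zero =>
    have hge : xs.length ≤ a := by omega
    have h1 : PySem.List.len xs ≤ (a : Int) := by
      simp only [PySem.List.len]; exact_mod_cast hge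
    rw [List.drop_eq_nil_of_le hge]
    simp [pysem]
    omega
  | succ k ih =>
    have hlt : a < xs.length := by omega
    have h1 : (a : Int) < PySem.List.len xs := by
      simp only [PySem.List.len]; exact_mod_cast hlt
    rw [PySem.List.pyRange_one_cons h1, List.map_cons]
    have hget : PySem.List.pyGetD xs (a : Int) 0 = xs[a] := by
      rw [PySem.List.pyGetD_natCast]
      simp [hlt]
    have hcast : ((a : Int) + 1) = ((a + 1 : Nat) : Int) := by push_cast; ring
    rw [hget, hcast, ih (a + 1) (by omega), List.drop_eq_getElem_cons hlt]

-- one outer iteration: A's inner index loop produces B's slice comprehension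
theorem pv_inner_eq (list : List Int) (i : Int) (h0 : 0 ≤ i) :
    (PySem.List.pyRange (i + 1) (PySem.List.len list)).map (fun j =>
        let d0 := PySem.List.pyGetD list i 0 - PySem.List.pyGetD list j 0
        if d0 < 0 then -d0 else d0) =
      (PySem.List.slice list (some (i + 1)) none).map
        (fun y => |PySem.List.pyGetD list i 0 - y|) := by
  rw [PySem.List.slice_from list (by omega : (0:Int) ≤ i + 1)]
  have hi : ((i.toNat + 1 : Nat) : Int) = i + 1 := by omega
  calc (PySem.List.pyRange (i + 1) (PySem.List.len list)).map (fun j =>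
          let d0 := PySem.List.pyGetD list i 0 - PySem.List.pyGetD list j 0
          if d0 < 0 then -d0 else d0)
      = ((PySem.List.pyRange ((i.toNat + 1 : Nat) : Int) (PySem.List.len list)).map
          (fun j => PySem.List.pyGetD list j 0)).map
          (fun y => if PySem.List.pyGetD list i 0 - y < 0
                    then -(PySem.List.pyGetD list i 0 - y)
                    else PySem.List.pyGetD list i 0 - y) := by
        rw [hi, List.map_map]; rfl
    _ = (list.drop (i + 1).toNat).map (fun y => |PySem.List.pyGetD list i 0 - y|) := by
        rw [pv_map_pyGetD_pyRange_from list (i.toNat + 1)]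
        have hdt : (i + 1).toNat = i.toNat + 1 := by omega
        rw [hdt]
        apply List.map_congr_left
        intro y _
        rcases lt_or_ge (PySem.List.pyGetD list i 0 - y) 0 with h | h
        · rw [if_pos h, abs_of_neg h]
        · rw [if_neg (not_lt.2 h), abs_of_nonneg h]

-- A's stream of differences IS B's (unsorted) diffs list
theorem pv_streams_eq (list : List Int) :
    (PySem.List.pyRange 0 (PySem.List.len list)).flatMap (fun i =>
        (PySem.List.pyRange (i + 1) (PySem.List.len list)).map (fun j =>
          let d0 := PySem.List.pyGetD list i 0 - PySem.List.pyGetD list j 0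
          if d0 < 0 then -d0 else d0)) =
      (PySem.List.enumerate list).flatMap
        (fun p => (PySem.List.slice list (some (p.1 + 1)) none).map (fun y => |p.2 - y|)) := by
  rw [PySem.List.enumerate_eq_map_pyRange list 0, List.flatMap_map]
  apply List.flatMap_congr
  intro i hi
  have h0 : 0 ≤ i := (PySem.List.mem_pyRange_one.1 hi).1
  exact pv_inner_eq list i h0

-- the ok flag factors out of the scan
theorem pvRunLoop_factor (g : Int) (ds : List Int) (ok : Bool) (prev : Option Int) (run : Int) :
    pvRunLoop g ds ok prev run = (ok && pvRunLoop g ds true prev run) := by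
  induction ds generalizing ok prev run with
  | nil => simp [pvRunLoop]
  | cons d rest ih =>
    simp only [pvRunLoop]
    rw [ih, ih (ok := true && _)]
    simp [Bool.and_assoc]

-- on a sorted list the run-length scan checks that every value's count is at most g
theorem pvRunLoop_sorted_eq (g : Int) (s : List Int) (hs : s.Pairwise (· ≤ ·)) :
    ∀ (prev : Option Int) (run : Int),
    (∀ b, prev = some b → ∀ x ∈ s, b ≤ x) →
    pvRunLoop g s true prev run =
      decide (∀ x ∈ s,
        (if some x = prev then run + (s.count x : Int) else (s.count x : Int)) ≤ g) := by
  induction s with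
  | nil => intro prev run _; simp [pvRunLoop]
  | cons d t ih =>
    intro prev run hprev
    have hdt : ∀ x ∈ t, d ≤ x := (List.pairwise_cons.1 hs).1
    have ht : t.Pairwise (· ≤ ·) := (List.pairwise_cons.1 hs).2
    simp only [pvRunLoop]
    set run' : Int := if some d = prev then run + 1 else 1 with hrun'
    rw [pvRunLoop_factor, ih ht (some d) run'
      (by intro b hb x hx; injection hb with hb; subst hb; exact hdt x hx)]
    rw [Bool.true_and, Bool.eq_iff_iff]
    simp only [Bool.and_eq_true, decide_eq_true_eq]
    have hcnt : ∀ x : Int, ((d :: t).count x : Int) = (t.count x : Int) + (if x = d then 1 else 0) := by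
      intro x
      rcases eq_or_ne x d with rfl | hne
      · simp
      · simp [List.count_cons]
        rw [if_neg (Ne.symm hne), if_neg hne]
    by_cases hpd : prev = some d
    · -- continuing the run of d
      subst hpd
      have hrun1 : run' = run + 1 := by simp [hrun']
      constructor
      · rintro ⟨hr, hall⟩ x hx
        rcases List.mem_cons.1 hx with rfl | hxt
        · rw [if_pos rfl, hcnt x, if_pos rfl]
          by_cases hxt' : x ∈ t
          · have := hall x hxt'; rw [if_pos rfl, hrun1] at this; omega
          · have : t.count x = 0 := List.count_eq_zero.2 hxt'
            rw [this]; rw [hrun1] at hr; push_cast; omega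
        · have := hall x hxt
          rcases eq_or_ne x d with rfl | hne
          · rw [if_pos rfl, hrun1] at this
            rw [if_pos rfl, hcnt x, if_pos rfl]; omega
          · rw [if_neg (by simpa using hne)] at this
            rw [if_neg (by simpa using hne), hcnt x, if_neg hne]; omega
      · intro hall
        have hd := hall d (List.mem_cons_self)
        rw [if_pos rfl, hcnt d, if_pos rfl] at hd
        constructor
        · rw [hrun1]; have : (0:Int) ≤ (t.count d : Int) := by positivity
          omega
        · intro x hxt
          rcases eq_or_ne x d with rfl | hne
          · rw [if_pos rfl, hrun1]; omega
          · have := hall x (List.mem_cons_of_mem d hxt)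
            rw [if_neg (by simpa using hne), hcnt x, if_neg hne] at this
            rw [if_neg (by simpa using hne)]; omega
    · -- a fresh run starting at d; prev (if any) is smaller than everything in d :: t
      have hrun1 : run' = 1 := by
        rw [hrun', if_neg]
        intro h; exact hpd (by simpa using h.symm)
      have hnotprev : ∀ x ∈ d :: t, ¬ (some x = prev) := by
        intro x hx h
        obtain ⟨b, rfl⟩ : ∃ b, prev = some b := ⟨x, h.symm⟩
        have hble := hprev b rfl
        have hbd : b ≤ d := hble d List.mem_cons_self
        have hbx : b ≤ x := hble x hx
        have hxb : x = b := by simpa using h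
        rcases List.mem_cons.1 hx with rfl | hxt
        · exact hpd (by rw [hxb])
        · have : d ≤ x := hdt x hxt
          have : b < d ∨ b = d := lt_or_eq_of_le hbd
          rcases this with hlt | rfl
          · omega
          · exact hpd rfl
      constructor
      · rintro ⟨hr, hall⟩ x hx
        rw [if_neg (hnotprev x hx), hcnt x]
        rcases List.mem_cons.1 hx with rfl | hxt
        · rw [if_pos rfl]
          by_cases hxt' : x ∈ t
          · have := hall x hxt'; rw [if_pos rfl, hrun1] at this; omega
          · have : t.count x = 0 := List.count_eq_zero.2 hxt'
            rw [this]; rw [hrun1] at hr; push_cast; omega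
        · have := hall x hxt
          rcases eq_or_ne x d with rfl | hne
          · rw [if_pos rfl, hrun1] at this; rw [if_pos rfl]; omega
          · rw [if_neg (by simpa using hne)] at this; rw [if_neg hne]; omega
      · intro hall
        have hd := hall d (List.mem_cons_self)
        rw [if_neg (hnotprev d List.mem_cons_self), hcnt d, if_pos rfl] at hd
        constructor
        · rw [hrun1]; have : (0:Int) ≤ (t.count d : Int) := by positivity
          omega
        · intro x hxt
          rcases eq_or_ne x d with rfl | hne
          · rw [if_pos rfl, hrun1]; omega
          · have := hall x (List.mem_cons_of_mem d hxt)
            rw [if_neg (hnotprev x (List.mem_cons_of_mem d hxt)), hcnt x, if_neg hne] at this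
            rw [if_neg (by simpa using hne)]; omega

-- ===== VERDICT (by name: the statement is the Claim_ definition above) =====
theorem is_sidon_set_spec : Claim_equal_is_sidon_set := by
  intro list g _
  unfold Spec_is_sidon_set
  unfold is_sidon_set is_sidon_set_alt
  rw [pvILoop_eq_proc, pv_streams_eq]
  set L := (PySem.List.enumerate list).flatMap
      (fun p => (PySem.List.slice list (some (p.1 + 1)) none).map (fun y => |p.2 - y|)) with hL
  set S := PySem.List.sorted L (fun x => x) false with hS
  have hperm : S.Perm L := PySem.List.sorted_perm L (fun x => x) false
  rw [pvProc_isSome g L [] PySem.Dict.empty (by simp) (by simp)]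
  rw [pvRunLoop_sorted_eq g S (PySem.List.sorted_pairwise L (fun x => x)) none 0
    (by rintro b ⟨⟩)]
  rw [decide_eq_decide]
  constructor
  · intro h x hx
    rw [if_neg (by rintro ⟨⟩)]
    rw [hperm.count_eq]
    exact h x (hperm.mem_iff.1 hx)
  · intro h x hx
    have := h x (hperm.mem_iff.2 hx)
    rw [if_neg (by rintro ⟨⟩), hperm.count_eq] at this
    simpa using this
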